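-- pv_equiv track=rewrite | github.com/MrSmoove/aita-ai-simulation | app/services/simulation.py | _build_commenter_profiles
-- ===== SOURCE A (Python) =====
-- import itertools
-- from typing import Dict, Any, List, Optional
--
-- COMMENTER_ARCHETYPES = [
--     "blunt and practical",
--     "dry and sarcastic",
--     "empathetic but firm",
--     "petty and amused",
--     "skeptical and suspicious",
--     "mildly judgmental but fair",
-- ]
--
-- FOCUS_AREAS = [
--     "workplace etiquette",
--     "boundaries and respect",
--     "fairness and consistency",
--     "tone and delivery",
--     "social awkwardness",
--     "common sense practicality",
-- ]
--
-- RESPONSE_LENGTHS = [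
--     "very short",
--     "short",
--     "medium-short",
-- ]
--
-- DEBATE_STYLES = [
--     "likely to challenge another commenter directly",
--     "more likely to add a fresh angle than argue",
--     "likes backing someone up with a sharper take",
--     "likes pushing back on bad reasoning",
-- ]
--
-- JUDGMENT_TEMPOS = [
--     "quick to judge",
--     "slow to judge",
--     "likes weighing nuance before deciding",
--     "reacts strongly to bad tone",
-- ]
--
-- SYMPATHY_BIASES = [
--     "tends to sympathize with socially awkward people",
--     "tends to sympathize with the person setting boundaries",
--     "does not automatically sympathize with the narrator",
--     "is alert to missing context and unreliable framing",
-- ]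
--
-- def _build_commenter_profiles(num_commenters: int) -> List[Dict[str, str]]:
--     combinations = sorted(
--         itertools.product(
--             COMMENTER_ARCHETYPES,
--             FOCUS_AREAS,
--             RESPONSE_LENGTHS,
--             DEBATE_STYLES,
--             JUDGMENT_TEMPOS,
--             SYMPATHY_BIASES,
--         )
--     )
--
--     step = max(1, len(combinations) // max(1, num_commenters))
--
--     profiles: List[Dict[str, str]] = []
--     for index in range(num_commenters):
--         tone, focus, length, debate_style, judgment_tempo, sympathy_bias = combinations[
--             (index * step) % len(combinations)
--         ]
--         profiles.append(
--             {
--                 "agent_id": f"c{index + 1}",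
--                 "tone": tone,
--                 "focus_area": focus,
--                 "response_length": length,
--                 "debate_style": debate_style,
--                 "judgment_tempo": judgment_tempo,
--                 "sympathy_bias": sympathy_bias,
--             }
--         )
--     return profiles
-- ===== SOURCE B (Python) =====
-- from typing import Dict, List
--
-- COMMENTER_ARCHETYPES = [
--     "blunt and practical",
--     "dry and sarcastic",
--     "empathetic but firm",
--     "petty and amused",
--     "skeptical and suspicious",
--     "mildly judgmental but fair",
-- ]
--
-- FOCUS_AREAS = [
--     "workplace etiquette",
--     "boundaries and respect",
--     "fairness and consistency",
--     "tone and delivery",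
--     "social awkwardness",
--     "common sense practicality",
-- ]
--
-- RESPONSE_LENGTHS = [
--     "very short",
--     "short",
--     "medium-short",
-- ]
--
-- DEBATE_STYLES = [
--     "likely to challenge another commenter directly",
--     "more likely to add a fresh angle than argue",
--     "likes backing someone up with a sharper take",
--     "likes pushing back on bad reasoning",
-- ]
--
-- JUDGMENT_TEMPOS = [
--     "quick to judge",
--     "slow to judge",
--     "likes weighing nuance before deciding",
--     "reacts strongly to bad tone",
-- ]
--
-- SYMPATHY_BIASES = [
--     "tends to sympathize with socially awkward people",
--     "tends to sympathize with the person setting boundaries",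
--     "does not automatically sympathize with the narrator",
--     "is alert to missing context and unreliable framing",
-- ]
--
--
-- def _build_commenter_profiles(num_commenters: int) -> List[Dict[str, str]]:
--     # Mixed-radix decode: sorted(product(lists)) at index k is exactly the tuple of
--     # the individually-sorted lists indexed by the mixed-radix digits of k, so the
--     # 6912-element product is never materialised or sorted.
--     tones = sorted(COMMENTER_ARCHETYPES)
--     focuses = sorted(FOCUS_AREAS)
--     lengths = sorted(RESPONSE_LENGTHS)
--     debates = sorted(DEBATE_STYLES)
--     tempos = sorted(JUDGMENT_TEMPOS)
--     biases = sorted(SYMPATHY_BIASES)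
--     total = (len(tones) * len(focuses) * len(lengths)
--              * len(debates) * len(tempos) * len(biases))
--     step = max(1, total // max(1, num_commenters))
--     profiles: List[Dict[str, str]] = []
--     for index in range(num_commenters):
--         k = (index * step) % total
--         k, b = divmod(k, len(biases))
--         k, t = divmod(k, len(tempos))
--         k, d = divmod(k, len(debates))
--         k, l = divmod(k, len(lengths))
--         a, f = divmod(k, len(focuses))
--         profiles.append(
--             {
--                 "agent_id": f"c{index + 1}",
--                 "tone": tones[a],
--                 "focus_area": focuses[f],
--                 "response_length": lengths[l],
--                 "debate_style": debates[d],
--                 "judgment_tempo": tempos[t],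
--                 "sympathy_bias": biases[b],
--             }
--         )
--     return profiles
-- ===== Notes on version B (the rewrite author's own statement) =====
-- stated objective: alternative
-- what changed: B never materialises or sorts the 6912-tuple Cartesian product: it sorts the six attribute lists individually and decodes each needed index (index*step) % 6912 in mixed radix with divmod, looking the digits up in the small sorted lists.
import Mathlib
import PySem

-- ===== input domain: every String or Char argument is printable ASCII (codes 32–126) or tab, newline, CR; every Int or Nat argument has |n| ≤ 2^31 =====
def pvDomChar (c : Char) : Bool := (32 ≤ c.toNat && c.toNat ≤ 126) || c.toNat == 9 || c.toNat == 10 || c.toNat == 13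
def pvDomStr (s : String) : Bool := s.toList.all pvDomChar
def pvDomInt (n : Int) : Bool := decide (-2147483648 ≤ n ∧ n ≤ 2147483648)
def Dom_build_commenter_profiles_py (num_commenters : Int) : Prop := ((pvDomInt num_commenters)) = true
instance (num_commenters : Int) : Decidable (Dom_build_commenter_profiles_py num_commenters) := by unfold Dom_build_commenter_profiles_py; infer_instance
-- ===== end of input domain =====

-- B replaces 'sort the 6912-tuple Cartesian product, then index' by sorting the six small
-- lists and decoding each needed index directly in mixed radix (objective: alternative).

-- ===== PORT A =====
def pvTones : List String := ["blunt and practical", "dry and sarcastic", "empathetic but firm", "petty and amused", "skeptical and suspicious", "mildly judgmental but fair"]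
def pvFocus : List String := ["workplace etiquette", "boundaries and respect", "fairness and consistency", "tone and delivery", "social awkwardness", "common sense practicality"]
def pvLengths : List String := ["very short", "short", "medium-short"]
def pvDebates : List String := ["likely to challenge another commenter directly", "more likely to add a fresh angle than argue", "likes backing someone up with a sharper take", "likes pushing back on bad reasoning"]
def pvTempos : List String := ["quick to judge", "slow to judge", "likes weighing nuance before deciding", "reacts strongly to bad tone"]
def pvBiases : List String := ["tends to sympathize with socially awkward people", "tends to sympathize with the person setting boundaries", "does not automatically sympathize with the narrator", "is alert to missing context and unreliable framing"]

-- Key for Python's comparison of 6-tuples of str: lexicographic over the strings' code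
-- points. Exact: Python tuple '<' is lexicographic, str '<' is code-point lexicographic =
-- '<' on toList (Lean's own String order is kernel-opaque, so we compare on List Char).
def pvKey6 (t : String × String × String × String × String × String) :
    Lex (List Char × Lex (List Char × Lex (List Char × Lex (List Char × Lex (List Char × List Char))))) :=
  toLex (t.1.toList, toLex (t.2.1.toList, toLex (t.2.2.1.toList,
    toLex (t.2.2.2.1.toList, toLex (t.2.2.2.2.1.toList, t.2.2.2.2.2.toList)))))

def build_commenter_profiles_py (num_commenters : Int) : List (List (String × String)) :=
  -- itertools.product = nested List.product (right-nested pairs, same order);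
  -- sorted(tuples): Python's sorted is a stable comparison sort; ported as the stable
  -- List.mergeSort with exactly Python's comparison of 6-tuples of str (the pvKey6 order)
  let combinations := List.mergeSort
      (pvTones ×ˢ (pvFocus ×ˢ (pvLengths ×ˢ (pvDebates ×ˢ (pvTempos ×ˢ pvBiases)))))
      (fun a b => decide (pvKey6 a ≤ pvKey6 b))
  let step : Int := max 1 (PySem.Int.floordiv (PySem.List.len combinations) (max 1 num_commenters))
  (PySem.List.pyRange 0 num_commenters 1).foldl (fun profiles index =>
    -- combinations[(index*step) % len]: the index is always in range, so pyGetD is exact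
    let t := PySem.List.pyGetD combinations
        (PySem.Int.mod (index * step) (PySem.List.len combinations)) ("", "", "", "", "", "")
    profiles ++ [[("agent_id", "c" ++ PySem.Int.toStr (index + 1)), ("tone", t.1),
      ("focus_area", t.2.1), ("response_length", t.2.2.1), ("debate_style", t.2.2.2.1),
      ("judgment_tempo", t.2.2.2.2.1), ("sympathy_bias", t.2.2.2.2.2)]]) []

-- ===== PORT B =====
def build_commenter_profiles_py_alt (num_commenters : Int) : List (List (String × String)) :=
  -- sorted(strings) = PySem.List.sorted with key toList (code-point order, exact)
  let tones := PySem.List.sorted pvTones (fun s => s.toList) false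
  let focuses := PySem.List.sorted pvFocus (fun s => s.toList) false
  let lengths := PySem.List.sorted pvLengths (fun s => s.toList) false
  let debates := PySem.List.sorted pvDebates (fun s => s.toList) false
  let tempos := PySem.List.sorted pvTempos (fun s => s.toList) false
  let biases := PySem.List.sorted pvBiases (fun s => s.toList) false
  let total := PySem.List.len tones * PySem.List.len focuses * PySem.List.len lengths *
      PySem.List.len debates * PySem.List.len tempos * PySem.List.len biases
  let step : Int := max 1 (PySem.Int.floordiv total (max 1 num_commenters))
  (PySem.List.pyRange 0 num_commenters 1).foldl (fun profiles index =>
    -- divmod(k, len): each divisor is a positive constant, floordiv/mod are exact;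
    -- each list index is in range, so pyGetD is exact
    let k0 := PySem.Int.mod (index * step) total
    let b := PySem.Int.mod k0 (PySem.List.len biases)
    let k1 := PySem.Int.floordiv k0 (PySem.List.len biases)
    let t := PySem.Int.mod k1 (PySem.List.len tempos)
    let k2 := PySem.Int.floordiv k1 (PySem.List.len tempos)
    let d := PySem.Int.mod k2 (PySem.List.len debates)
    let k3 := PySem.Int.floordiv k2 (PySem.List.len debates)
    let l := PySem.Int.mod k3 (PySem.List.len lengths)
    let k4 := PySem.Int.floordiv k3 (PySem.List.len lengths)
    let f := PySem.Int.mod k4 (PySem.List.len focuses)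
    let a := PySem.Int.floordiv k4 (PySem.List.len focuses)
    profiles ++ [[("agent_id", "c" ++ PySem.Int.toStr (index + 1)),
      ("tone", PySem.List.pyGetD tones a ""), ("focus_area", PySem.List.pyGetD focuses f ""),
      ("response_length", PySem.List.pyGetD lengths l ""),
      ("debate_style", PySem.List.pyGetD debates d ""),
      ("judgment_tempo", PySem.List.pyGetD tempos t ""),
      ("sympathy_bias", PySem.List.pyGetD biases b "")]]) []

-- ===== PRECONDITION & SPEC =====
def Spec_build_commenter_profiles_py (num_commenters : Int) (out : List (List (String × String))) : Prop := out = build_commenter_profiles_py_alt num_commenters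
instance (num_commenters : Int) (out : List (List (String × String))) : Decidable (Spec_build_commenter_profiles_py num_commenters out) := by unfold Spec_build_commenter_profiles_py; infer_instance

-- ===== CLAIM (what is proved, stated in full; the proofs are below) =====
def Claim_equal_build_commenter_profiles_py : Prop := ∀ (num_commenters : Int), Dom_build_commenter_profiles_py num_commenters → Spec_build_commenter_profiles_py num_commenters (build_commenter_profiles_py num_commenters)

-- ===== LEMMAS AND PROOFS =====

-- the six lists, each sorted (values of B's small sorts, proved by decide below)
def pvS1 : List String := ["blunt and practical", "dry and sarcastic", "empathetic but firm", "mildly judgmental but fair", "petty and amused", "skeptical and suspicious"]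
def pvS2 : List String := ["boundaries and respect", "common sense practicality", "fairness and consistency", "social awkwardness", "tone and delivery", "workplace etiquette"]
def pvS3 : List String := ["medium-short", "short", "very short"]
def pvS4 : List String := ["likely to challenge another commenter directly", "likes backing someone up with a sharper take", "likes pushing back on bad reasoning", "more likely to add a fresh angle than argue"]
def pvS5 : List String := ["likes weighing nuance before deciding", "quick to judge", "reacts strongly to bad tone", "slow to judge"]
def pvS6 : List String := ["does not automatically sympathize with the narrator", "is alert to missing context and unreliable framing", "tends to sympathize with socially awkward people", "tends to sympathize with the person setting boundaries"]

-- the Cartesian product of the sorted lists: the value of A's sorted 6912-element product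
def pvP : List (String × String × String × String × String × String) :=
  pvS1 ×ˢ (pvS2 ×ˢ (pvS3 ×ˢ (pvS4 ×ˢ (pvS5 ×ˢ pvS6))))

lemma pv_hS1 : PySem.List.sorted pvTones (fun s => s.toList) false = pvS1 := by decide
lemma pv_hS2 : PySem.List.sorted pvFocus (fun s => s.toList) false = pvS2 := by decide
lemma pv_hS3 : PySem.List.sorted pvLengths (fun s => s.toList) false = pvS3 := by decide
lemma pv_hS4 : PySem.List.sorted pvDebates (fun s => s.toList) false = pvS4 := by decide
lemma pv_hS5 : PySem.List.sorted pvTempos (fun s => s.toList) false = pvS5 := by decide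
lemma pv_hS6 : PySem.List.sorted pvBiases (fun s => s.toList) false = pvS6 := by decide

-- Pairwise of a product from pairwise of the factors
lemma pv_pairwise_product {α β : Type} {r : α → α → Prop} {s : β → β → Prop}
    {xs : List α} {ys : List β} (hx : xs.Pairwise r) (hy : ys.Pairwise s) :
    (xs ×ˢ ys).Pairwise (fun p q => r p.1 q.1 ∨ (p.1 = q.1 ∧ s p.2 q.2)) := by
  induction xs with
  | nil => simp
  | cons x xs ih =>
    rw [List.product_cons]
    rcases List.pairwise_cons.mp hx with ⟨hxh, hxt⟩
    refine List.pairwise_append.mpr ⟨?_, ih hxt, ?_⟩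
    · rw [List.pairwise_map]
      exact hy.imp (fun h => Or.inr ⟨rfl, h⟩)
    · intro p hp q hq
      rcases List.mem_map.mp hp with ⟨b, _, rfl⟩
      have hq1 : q.1 ∈ xs := by
        have := List.mem_product.mp (show (q.1, q.2) ∈ xs ×ˢ ys by simpa using hq)
        exact this.1
      exact Or.inl (hxh _ hq1)

-- strict sortedness of pvP in the pvKey6 (Python tuple) order
lemma pv_pairwise_P : pvP.Pairwise (fun p q => pvKey6 p < pvKey6 q) := by
  have h1 : pvS1.Pairwise (fun a b : String => a.toList < b.toList) := by decide
  have h2 : pvS2.Pairwise (fun a b : String => a.toList < b.toList) := by decide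
  have h3 : pvS3.Pairwise (fun a b : String => a.toList < b.toList) := by decide
  have h4 : pvS4.Pairwise (fun a b : String => a.toList < b.toList) := by decide
  have h5 : pvS5.Pairwise (fun a b : String => a.toList < b.toList) := by decide
  have h6 : pvS6.Pairwise (fun a b : String => a.toList < b.toList) := by decide
  have hp := pv_pairwise_product h1 (pv_pairwise_product h2 (pv_pairwise_product h3
    (pv_pairwise_product h4 (pv_pairwise_product h5 h6))))
  refine hp.imp ?_
  intro p q h
  simp only [pvKey6, Prod.Lex.lt_iff, ofLex_toLex]
  rcases h with h | ⟨e1, h⟩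
  · exact Or.inl h
  refine Or.inr ⟨by rw [e1], ?_⟩
  rcases h with h | ⟨e2, h⟩
  · exact Or.inl h
  refine Or.inr ⟨by rw [e2], ?_⟩
  rcases h with h | ⟨e3, h⟩
  · exact Or.inl h
  refine Or.inr ⟨by rw [e3], ?_⟩
  rcases h with h | ⟨e4, h⟩
  · exact Or.inl h
  refine Or.inr ⟨by rw [e4], ?_⟩
  rcases h with h | ⟨e5, h⟩
  · exact Or.inl h
  exact Or.inr ⟨by rw [e5], h⟩

lemma pvKey6_inj : Function.Injective pvKey6 := by
  rintro ⟨a1, a2, a3, a4, a5, a6⟩ ⟨b1, b2, b3, b4, b5, b6⟩ h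
  simp only [pvKey6, toLex_inj, Prod.mk.injEq, String.toList_inj] at h
  obtain ⟨h1, h2, h3, h4, h5, h6⟩ := h
  simp_all

-- pvP is a rearrangement of the raw product
lemma pv_raw_perm :
    pvP.Perm (pvTones ×ˢ (pvFocus ×ˢ (pvLengths ×ˢ (pvDebates ×ˢ (pvTempos ×ˢ pvBiases))))) :=
  List.Perm.product (pv_hS1 ▸ PySem.List.sorted_perm pvTones _ false)
    (List.Perm.product (pv_hS2 ▸ PySem.List.sorted_perm pvFocus _ false)
      (List.Perm.product (pv_hS3 ▸ PySem.List.sorted_perm pvLengths _ false)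
        (List.Perm.product (pv_hS4 ▸ PySem.List.sorted_perm pvDebates _ false)
          (List.Perm.product (pv_hS5 ▸ PySem.List.sorted_perm pvTempos _ false)
            (pv_hS6 ▸ PySem.List.sorted_perm pvBiases _ false)))))

-- A's sort, named: sorting the raw product gives exactly pvP
lemma pv_combos_eq :
    List.mergeSort (pvTones ×ˢ (pvFocus ×ˢ (pvLengths ×ˢ (pvDebates ×ˢ (pvTempos ×ˢ pvBiases)))))
      (fun a b => decide (pvKey6 a ≤ pvKey6 b)) = pvP := by
  apply List.Perm.eq_of_pairwise (le := fun a b => pvKey6 a ≤ pvKey6 b)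
  · intro a b _ _ hab hba
    exact pvKey6_inj (le_antisymm hab hba)
  · have hp := List.pairwise_mergeSort (le := fun a b => decide (pvKey6 a ≤ pvKey6 b))
      (fun a b c hab hbc => by
        simp only [decide_eq_true_eq] at *
        exact le_trans hab hbc)
      (fun a b => by simp [le_total])
      (pvTones ×ˢ (pvFocus ×ˢ (pvLengths ×ˢ (pvDebates ×ˢ (pvTempos ×ˢ pvBiases)))))
    exact hp.imp (fun h => by simpa using h)
  · exact pv_pairwise_P.imp (fun h => le_of_lt h)
  · exact (List.mergeSort_perm _ _).trans pv_raw_perm.symm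

-- indexing into a product = div/mod decomposition of the index
lemma pv_product_getD {α β : Type} (xs : List α) (ys : List β) (m : Nat) (d1 : α) (d2 : β)
    (hm : m < xs.length * ys.length) :
    (xs ×ˢ ys).getD m (d1, d2) = (xs.getD (m / ys.length) d1, ys.getD (m % ys.length) d2) := by
  have hy : 0 < ys.length := by
    rcases Nat.eq_zero_or_pos ys.length with h0 | h0
    · rw [h0, Nat.mul_zero] at hm; omega
    · exact h0
  induction xs generalizing m with
  | nil => simp at hm
  | cons x xs ih =>
    rw [List.product_cons]
    by_cases h : m < ys.length
    · rw [List.getD_append _ _ _ m (by simpa using h), Nat.div_eq_of_lt h, Nat.mod_eq_of_lt h]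
      simp [List.getD_eq_getElem?_getD, List.getElem?_map, List.getElem?_eq_getElem h]
    · rw [List.getD_append_right _ _ _ m (by simpa using Nat.le_of_not_lt h)]
      rw [List.length_map]
      have hm' : m - ys.length < xs.length * ys.length := by
        rw [List.length_cons] at hm; rw [Nat.succ_mul] at hm; omega
      rw [ih _ hm']
      rw [Nat.div_eq_sub_div hy (Nat.le_of_not_lt h), Nat.mod_eq_sub_mod (Nat.le_of_not_lt h)]
      simp

-- decoding pvP at m: the mixed-radix digits of m pick from the sorted factor lists
lemma pv_decode (m : Nat) (hm : m < 6912) :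
    pvP.getD m ("", "", "", "", "", "") =
      (pvS1.getD (m / 1152) "", pvS2.getD (m / 192 % 6) "", pvS3.getD (m / 64 % 3) "",
       pvS4.getD (m / 16 % 4) "", pvS5.getD (m / 4 % 4) "", pvS6.getD (m % 4) "") := by
  have L6 : pvS6.length = 4 := by decide
  have L56 : (pvS5 ×ˢ pvS6).length = 16 := by simp [List.length_product]; decide
  have L456 : (pvS4 ×ˢ (pvS5 ×ˢ pvS6)).length = 64 := by simp [List.length_product]; decide
  have L3456 : (pvS3 ×ˢ (pvS4 ×ˢ (pvS5 ×ˢ pvS6))).length = 192 := by simp [List.length_product]; decide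
  have L23456 : (pvS2 ×ˢ (pvS3 ×ˢ (pvS4 ×ˢ (pvS5 ×ˢ pvS6)))).length = 1152 := by
    simp [List.length_product]; decide
  rw [pvP, pv_product_getD _ _ _ _ _ (by rw [L23456]; show m < 6 * 1152; omega), L23456]
  rw [pv_product_getD _ _ _ _ _ (by rw [L3456]; show m % 1152 < 6 * 192; omega), L3456]
  rw [pv_product_getD _ _ _ _ _ (by rw [L456]; show m % 1152 % 192 < 3 * 64; omega), L456]
  rw [pv_product_getD _ _ _ _ _ (by rw [L56]; show m % 1152 % 192 % 64 < 4 * 16; omega), L56]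
  rw [pv_product_getD _ _ _ _ _ (by rw [L6]; show m % 1152 % 192 % 64 % 16 < 4 * 4; omega), L6]
  have e2 : m % 1152 / 192 = m / 192 % 6 := by omega
  have e3 : m % 1152 % 192 / 64 = m / 64 % 3 := by omega
  have e4 : m % 1152 % 192 % 64 / 16 = m / 16 % 4 := by omega
  have e5 : m % 1152 % 192 % 64 % 16 / 4 = m / 4 % 4 := by omega
  have e6 : m % 1152 % 192 % 64 % 16 % 4 = m % 4 := by omega
  rw [e2, e3, e4, e5, e6]

lemma pv_floordiv_cast (mN : Nat) (k : Nat) :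
    PySem.Int.floordiv (mN : Int) (k : Int) = ((mN / k : Nat) : Int) :=
  PySem.Int.floordiv_natCast mN k

lemma pv_mod_cast (mN : Nat) (k : Nat) :
    PySem.Int.mod (mN : Int) (k : Int) = ((mN % k : Nat) : Int) :=
  PySem.Int.mod_natCast mN k

-- the per-index profile: A's lookup in pvP equals B's mixed-radix lookups
lemma pv_profile_eq (s index : Int) :
    (let t := PySem.List.pyGetD pvP (PySem.Int.mod (index * s) 6912) ("", "", "", "", "", "")
     [("agent_id", "c" ++ PySem.Int.toStr (index + 1)), ("tone", t.1),
      ("focus_area", t.2.1), ("response_length", t.2.2.1), ("debate_style", t.2.2.2.1),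
      ("judgment_tempo", t.2.2.2.2.1), ("sympathy_bias", t.2.2.2.2.2)]) =
    (let k0 := PySem.Int.mod (index * s) 6912
     let b := PySem.Int.mod k0 4
     let k1 := PySem.Int.floordiv k0 4
     let t := PySem.Int.mod k1 4
     let k2 := PySem.Int.floordiv k1 4
     let d := PySem.Int.mod k2 4
     let k3 := PySem.Int.floordiv k2 4
     let l := PySem.Int.mod k3 3
     let k4 := PySem.Int.floordiv k3 3
     let f := PySem.Int.mod k4 6
     let a := PySem.Int.floordiv k4 6
     [("agent_id", "c" ++ PySem.Int.toStr (index + 1)),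
      ("tone", PySem.List.pyGetD pvS1 a ""), ("focus_area", PySem.List.pyGetD pvS2 f ""),
      ("response_length", PySem.List.pyGetD pvS3 l ""),
      ("debate_style", PySem.List.pyGetD pvS4 d ""),
      ("judgment_tempo", PySem.List.pyGetD pvS5 t ""),
      ("sympathy_bias", PySem.List.pyGetD pvS6 b "")]) := by
  have h0 : 0 ≤ PySem.Int.mod (index * s) 6912 := PySem.Int.mod_nonneg _ (by norm_num)
  have h1 : PySem.Int.mod (index * s) 6912 < 6912 := PySem.Int.mod_lt _ (by norm_num)
  set m := PySem.Int.mod (index * s) 6912 with hmdef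
  obtain ⟨mN, hmN⟩ : ∃ mN : Nat, m = (mN : Int) := ⟨m.toNat, (Int.toNat_of_nonneg h0).symm⟩
  have hmNlt : mN < 6912 := by omega
  simp only [hmN]
  have c4 : (4 : Int) = ((4 : Nat) : Int) := by norm_cast
  have c3 : (3 : Int) = ((3 : Nat) : Int) := by norm_cast
  have c6 : (6 : Int) = ((6 : Nat) : Int) := by norm_cast
  simp only [c4, c3, c6, pv_floordiv_cast, pv_mod_cast, PySem.List.pyGetD_natCast]
  rw [pv_decode mN hmNlt]
  have e1 : mN / 4 / 4 / 4 / 3 / 6 = mN / 1152 := by omega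
  have e2 : mN / 4 / 4 / 4 / 3 % 6 = mN / 192 % 6 := by omega
  have e3 : mN / 4 / 4 / 4 % 3 = mN / 64 % 3 := by omega
  have e4 : mN / 4 / 4 % 4 = mN / 16 % 4 := by omega
  rw [e1, e2, e3, e4]

lemma pv_lenP : PySem.List.len pvP = 6912 := by
  rw [PySem.List.len_eq]
  norm_num [pvP, List.length_product]
  decide

-- ===== VERDICT (by name: the statement is the Claim_ definition above) =====
theorem build_commenter_profiles_py_spec : Claim_equal_build_commenter_profiles_py := by
  intro n _
  have hl1 : PySem.List.len pvS1 = 6 := by decide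
  have hl2 : PySem.List.len pvS2 = 6 := by decide
  have hl3 : PySem.List.len pvS3 = 3 := by decide
  have hl4 : PySem.List.len pvS4 = 4 := by decide
  have hl5 : PySem.List.len pvS5 = 4 := by decide
  have hl6 : PySem.List.len pvS6 = 4 := by decide
  unfold Spec_build_commenter_profiles_py
  simp only [build_commenter_profiles_py, build_commenter_profiles_py_alt, pv_combos_eq,
    pv_hS1, pv_hS2, pv_hS3, pv_hS4, pv_hS5, pv_hS6, pv_lenP, hl1, hl2, hl3, hl4, hl5, hl6]
  have htot : (6 * 6 * 3 * 4 * 4 * 4 : Int) = 6912 := by norm_num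
  rw [htot]
  apply PySem.List.foldl_congr_mem
  intro acc index _
  have := pv_profile_eq (max 1 (PySem.Int.floordiv 6912 (max 1 n))) index
  simp only at this ⊢
  rw [this]
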